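-- pv_equiv track=rewrite | github.com/Bl4omArchie/Binary-Tricks | scripts/add_list.py | check_carry
-- ===== SOURCE A (Python) =====
-- def check_carry(a: int, b: int, BIT_PER_ELEMENT):
--     c = 0
--
--     for _ in range(BIT_PER_ELEMENT):
--         c = (a & 1) + (b & 1) + c
--         c >>= 1
--         a >>= 1
--         b >>= 1
--     return c
-- ===== SOURCE B (Python) =====
-- def check_carry(a: int, b: int, BIT_PER_ELEMENT):
--     if BIT_PER_ELEMENT <= 0:
--         return 0
--     mask = (1 << BIT_PER_ELEMENT) - 1
--     return ((a & mask) + (b & mask)) >> BIT_PER_ELEMENT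
-- ===== Notes on version B (the rewrite author's own statement) =====
-- stated objective: faster
-- what changed: Replaces the per-bit loop (N iterations of bit extraction, add and shift) by a single mask-add-shift: carry = ((a & mask) + (b & mask)) >> N with mask = 2^N - 1.
import Mathlib
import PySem

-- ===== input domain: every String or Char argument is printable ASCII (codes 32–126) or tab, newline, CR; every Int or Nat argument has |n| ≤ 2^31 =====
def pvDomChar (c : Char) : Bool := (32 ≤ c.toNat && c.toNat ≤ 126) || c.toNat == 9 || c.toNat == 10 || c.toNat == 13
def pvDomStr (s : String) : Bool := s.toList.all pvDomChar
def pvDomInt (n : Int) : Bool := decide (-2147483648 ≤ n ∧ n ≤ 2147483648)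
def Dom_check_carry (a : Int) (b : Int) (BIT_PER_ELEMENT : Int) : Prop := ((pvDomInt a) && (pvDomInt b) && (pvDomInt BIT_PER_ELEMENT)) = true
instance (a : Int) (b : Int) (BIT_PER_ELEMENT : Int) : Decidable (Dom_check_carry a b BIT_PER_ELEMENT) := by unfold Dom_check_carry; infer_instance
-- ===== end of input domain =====

-- B replaces A's per-bit carry loop by a single mask-add-shift (asymptotically fewer big-int operations).

-- ===== PORT A =====
-- literal port of A: c = 0; for _ in range(N): c = (a&1)+(b&1)+c; c >>= 1; a >>= 1; b >>= 1
def check_carry (a : Int) (b : Int) (BIT_PER_ELEMENT : Int) : Int :=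
  ((PySem.List.pyRange 0 BIT_PER_ELEMENT 1).foldl
    (fun (s : Int × Int × Int) _ =>
      let c := (PySem.Int.band s.2.1 1) + (PySem.Int.band s.2.2 1) + s.1
      (c >>> (1:Nat), s.2.1 >>> (1:Nat), s.2.2 >>> (1:Nat)))
    (0, a, b)).1

-- ===== PORT B =====
-- port of Source B: if N <= 0: return 0; mask = (1 << N) - 1; return ((a & mask) + (b & mask)) >> N
def check_carry_alt (a : Int) (b : Int) (BIT_PER_ELEMENT : Int) : Int :=
  if BIT_PER_ELEMENT ≤ 0 then 0
  else
    let mask : Int := ((1:Int) <<< BIT_PER_ELEMENT.toNat) - 1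
    ((PySem.Int.band a mask) + (PySem.Int.band b mask)) >>> BIT_PER_ELEMENT.toNat

-- ===== PRECONDITION & SPEC =====
def Spec_check_carry (a : Int) (b : Int) (BIT_PER_ELEMENT : Int) (out : Int) : Prop := out = check_carry_alt a b BIT_PER_ELEMENT
instance (a : Int) (b : Int) (BIT_PER_ELEMENT : Int) (out : Int) : Decidable (Spec_check_carry a b BIT_PER_ELEMENT out) := by unfold Spec_check_carry; infer_instance

-- ===== CLAIM (what is proved, stated in full; the proofs are below) =====
def Claim_equal_check_carry : Prop := ∀ (a : Int) (b : Int) (BIT_PER_ELEMENT : Int), Dom_check_carry a b BIT_PER_ELEMENT → Spec_check_carry a b BIT_PER_ELEMENT (check_carry a b BIT_PER_ELEMENT)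

-- ===== LEMMAS AND PROOFS =====

-- Python `x >> 1` on Int is floor division by 2
theorem pvShiftR_one (x : Int) : x >>> (1:Nat) = x / 2 := by
  simpa using Int.shiftRight_eq_div_pow x 1

theorem pvShiftR (x : Int) (n : Nat) : x >>> n = x / 2 ^ n := by
  simpa using Int.shiftRight_eq_div_pow x n

-- Python `x & 1` is `x % 2`
theorem pvBand_one (x : Int) : PySem.Int.band x 1 = x % 2 := by
  rw [PySem.Int.band_one]
  simp [PySem.Int.mod, Int.fmod_eq_emod]

-- Python `x & (2^n - 1)` is `x % 2^n`
theorem pvBand_mask (x : Int) (n : Nat) : PySem.Int.band x ((2:Int) ^ n - 1) = x % (2 ^ n) := by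
  have hM : (0:Int) < 2 ^ n := by positivity
  have hcast : ((2 ^ n : Nat) : Int) = 2 ^ n := by push_cast; ring
  have hmask : (0:Int) ≤ 2 ^ n - 1 := by omega
  have htn : ((2:Int) ^ n - 1).toNat = 2 ^ n - 1 := by omega
  unfold PySem.Int.band
  by_cases hx : 0 ≤ x
  · rw [if_pos hx, if_pos hmask, htn, Nat.and_two_pow_sub_one_eq_mod]
    have hx' : ((x.toNat : Int)) = x := Int.toNat_of_nonneg hx
    rw [Int.natCast_mod, hx', hcast]
  · rw [if_neg hx, if_pos hmask, htn]
    rw [Nat.land_comm, Nat.and_two_pow_sub_one_eq_mod]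
    -- x < 0: band x mask = (2^n - 1) - ((-x-1) % 2^n)
    have hz : (((-x - 1).toNat : Int)) = -x - 1 := Int.toNat_of_nonneg (by omega)
    have hzn : (-x - 1).toNat % 2 ^ n < 2 ^ n := Nat.mod_lt _ (by positivity)
    have hcastm : (((-x - 1).toNat % 2 ^ n : Nat) : Int) = (-x - 1) % 2 ^ n := by
      rw [Int.natCast_mod, hz, hcast]
    have hle : (-x - 1).toNat % 2 ^ n ≤ 2 ^ n - 1 := by omega
    have hgoal : ((2 ^ n - 1 - (-x - 1).toNat % 2 ^ n : Nat) : Int)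
        = 2 ^ n - 1 - (-x - 1) % 2 ^ n := by
      rw [Nat.cast_sub hle, Nat.cast_sub Nat.one_le_two_pow, Nat.cast_one, hcast, hcastm]
    rw [hgoal]
    -- now the pure Int fact: x % 2^n = 2^n - 1 - (-x-1) % 2^n
    have hw0 : (0:Int) ≤ (-x - 1) % 2 ^ n := Int.emod_nonneg _ (by omega)
    have hw1 : (-x - 1) % 2 ^ n < 2 ^ n := Int.emod_lt_of_pos _ hM
    have hdec : -x - 1 = (2:Int) ^ n * ((-x - 1) / 2 ^ n) + (-x - 1) % 2 ^ n :=
      (Int.ediv_add_emod (-x - 1) (2 ^ n)).symm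
    have : x % 2 ^ n = (2 ^ n - 1 - (-x - 1) % 2 ^ n + 2 ^ n * (-((-x - 1) / 2 ^ n) - 1)) % 2 ^ n := by
      congr 1
      linear_combination -hdec
    rw [this, Int.add_mul_emod_self_left]
    exact (Int.emod_eq_of_lt (by omega) (by omega)).symm

-- a % 2^(n+1) = a % 2 + 2 * ((a/2) % 2^n)
theorem pvEmod_two_pow_succ (a : Int) (n : Nat) :
    a % (2 ^ (n + 1)) = a % 2 + 2 * ((a / 2) % (2 ^ n)) := by
  have hM : (0:Int) < 2 ^ n := by positivity
  have hr0 : (0:Int) ≤ a % 2 := Int.emod_nonneg a (by norm_num)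
  have hr1 : a % 2 < 2 := Int.emod_lt_of_pos a (by norm_num)
  have hq0 : (0:Int) ≤ (a / 2) % (2 ^ n) := Int.emod_nonneg _ (by omega)
  have hq1 : (a / 2) % (2 ^ n) < 2 ^ n := Int.emod_lt_of_pos _ hM
  have hdecomp : a = a % 2 + 2 * ((a / 2) % (2 ^ n)) + (2 ^ (n+1)) * ((a / 2) / 2 ^ n) := by
    have h1 : a = 2 * (a / 2) + a % 2 := by
      have := Int.ediv_add_emod a 2; omega
    have h2 : a / 2 = (2:Int) ^ n * ((a / 2) / 2 ^ n) + (a / 2) % (2 ^ n) :=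
      (Int.ediv_add_emod (a / 2) (2 ^ n)).symm
    calc a = 2 * (a / 2) + a % 2 := h1
      _ = 2 * ((2:Int) ^ n * ((a / 2) / 2 ^ n) + (a / 2) % (2 ^ n)) + a % 2 := by rw [← h2]
      _ = a % 2 + 2 * ((a / 2) % (2 ^ n)) + (2 ^ (n+1)) * ((a / 2) / 2 ^ n) := by ring
  calc a % (2 ^ (n+1))
      = (a % 2 + 2 * ((a / 2) % (2 ^ n)) + (2 ^ (n+1)) * ((a / 2) / 2 ^ n)) % (2 ^ (n+1)) := by
        rw [← hdecomp]
    _ = (a % 2 + 2 * ((a / 2) % (2 ^ n))) % (2 ^ (n+1)) := by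
        rw [Int.add_mul_emod_self_left]
    _ = a % 2 + 2 * ((a / 2) % (2 ^ n)) := by
        apply Int.emod_eq_of_lt (by omega)
        have : (2:Int) ^ (n+1) = 2 * 2 ^ n := by ring
        omega

-- loop invariant for A's fold
theorem pvLoop (l : List Int) (c a b : Int) :
    (l.foldl
      (fun (s : Int × Int × Int) _ =>
        let c := (PySem.Int.band s.2.1 1) + (PySem.Int.band s.2.2 1) + s.1
        (c >>> (1:Nat), s.2.1 >>> (1:Nat), s.2.2 >>> (1:Nat)))
      (c, a, b)).1
    = (c + a % (2 ^ l.length) + b % (2 ^ l.length)) / 2 ^ l.length := by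
  induction l generalizing c a b with
  | nil => simp
  | cons x l ih =>
    simp only [List.foldl_cons, List.length_cons]
    rw [ih]
    rw [pvBand_one, pvBand_one, pvShiftR_one, pvShiftR_one, pvShiftR_one]
    have hM : (0:Int) < 2 ^ l.length := by positivity
    rw [pvEmod_two_pow_succ a l.length, pvEmod_two_pow_succ b l.length]
    have hsplit : c + (a % 2 + 2 * ((a / 2) % (2 ^ l.length)))
        + (b % 2 + 2 * ((b / 2) % (2 ^ l.length)))
        = (a % 2 + b % 2 + c) + ((a / 2) % (2 ^ l.length) + (b / 2) % (2 ^ l.length)) * 2 := by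
      ring
    rw [hsplit]
    have hpow : (2:Int) ^ (l.length + 1) = 2 * 2 ^ l.length := by ring
    rw [hpow, ← Int.ediv_ediv_eq_ediv_mul (by norm_num : (0:Int) ≤ 2),
      Int.add_mul_ediv_right _ _ (by norm_num : (2:Int) ≠ 0)]
    ring_nf

theorem pvRangeLen (N : Int) : (PySem.List.pyRange 0 N 1).length = N.toNat := by
  simp [PySem.List.pyRange]; omega

-- ===== VERDICT (by name: the statement is the Claim_ definition above) =====
theorem check_carry_spec : Claim_equal_check_carry := by
  intro a b N _
  unfold Spec_check_carry check_carry check_carry_alt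
  rw [pvLoop, pvRangeLen]
  by_cases hN : N ≤ 0
  · have : N.toNat = 0 := by omega
    simp [hN, this]
  · simp only [if_neg hN]
    have h1 : ((1:Int) <<< N.toNat) = 2 ^ N.toNat := by
      simp [Int.shiftLeft_eq]
    rw [h1, pvBand_mask, pvBand_mask, pvShiftR]
    ring_nf
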